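-- pv_equiv track=rewrite | github.com/TrongTheAlpaca/AdventOfCode | 2021/day_19/day_19.py | point_rotate
-- ===== SOURCE A (Python) =====
-- def point_rotate(coord: tuple, x_axis, y_axis, z_axis) -> tuple:
--     assert 0 <= x_axis < 4 and 0 <= y_axis < 4 and 0 <= z_axis < 4
--
--     mutable = list(coord)
--     for _ in range(z_axis):
--         mutable[0], mutable[1] = mutable[1], -mutable[0]
--     for _ in range(x_axis):
--         mutable[2], mutable[1] = mutable[1], -mutable[2]
--     for _ in range(y_axis):
--         mutable[0], mutable[2] = mutable[2], -mutable[0]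
--
--     return tuple(mutable)
-- ===== SOURCE B (Python) =====
-- def point_rotate(coord: tuple, x_axis, y_axis, z_axis) -> tuple:
--     assert 0 <= x_axis < 4 and 0 <= y_axis < 4 and 0 <= z_axis < 4
--
--     def quarter(a, b, n):
--         # closed form of applying (a, b) -> (b, -a) exactly n times, by n mod 4
--         n %= 4
--         if n == 0:
--             return a, b
--         if n == 1:
--             return b, -a
--         if n == 2:
--             return -a, -b
--         return -b, a
--
--     x, y, z = coord
--     x, y = quarter(x, y, z_axis)
--     z, y = quarter(z, y, x_axis)
--     x, z = quarter(x, z, y_axis)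
--     return (x, y, z)
-- ===== Notes on version B (the rewrite author's own statement) =====
-- stated objective: simpler
-- what changed: Replaces the three repeat-loops of in-place swaps by one closed-form quarter-turn helper applied once per axis, selecting among the four possible outcomes by the step count mod 4.
import Mathlib
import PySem

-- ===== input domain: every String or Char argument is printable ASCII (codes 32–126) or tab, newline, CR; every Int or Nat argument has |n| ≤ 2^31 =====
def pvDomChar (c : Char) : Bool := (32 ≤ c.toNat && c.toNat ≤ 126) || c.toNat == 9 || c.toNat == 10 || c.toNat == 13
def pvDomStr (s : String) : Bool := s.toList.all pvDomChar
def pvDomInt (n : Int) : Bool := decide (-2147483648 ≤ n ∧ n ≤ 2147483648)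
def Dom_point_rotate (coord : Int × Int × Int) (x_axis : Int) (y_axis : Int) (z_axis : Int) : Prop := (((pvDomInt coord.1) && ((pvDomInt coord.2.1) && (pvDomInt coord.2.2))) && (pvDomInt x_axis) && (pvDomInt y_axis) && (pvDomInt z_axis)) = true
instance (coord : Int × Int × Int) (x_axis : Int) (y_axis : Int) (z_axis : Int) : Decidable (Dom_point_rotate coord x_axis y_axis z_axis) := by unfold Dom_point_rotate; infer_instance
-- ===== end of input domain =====

-- B replaces the three repeat-loops of 90° swaps by one closed-form quarter-turn
-- helper chosen by the step count mod 4 (objective: simpler).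


-- ===== PORT A =====
-- the loop bodies: simultaneous assignments on the mutable list, as triples
def pvZStep (m : Int × Int × Int) : Int × Int × Int := (m.2.1, -m.1, m.2.2)
def pvXStep (m : Int × Int × Int) : Int × Int × Int := (m.1, -m.2.2, m.2.1)
def pvYStep (m : Int × Int × Int) : Int × Int × Int := (m.2.2, m.2.1, -m.1)

-- 'for _ in range(n): m = step m' (range of a negative int is empty, as in Python)
def pvIter (step : Int × Int × Int → Int × Int × Int) : Nat → (Int × Int × Int) → Int × Int × Int
  | 0, m => m
  | n + 1, m => pvIter step n (step m)

def point_rotate (coord : Int × Int × Int) (x_axis : Int) (y_axis : Int) (z_axis : Int) : Int × Int × Int :=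
  -- the Python assert raises outside 0 ≤ axis < 4; those inputs are excluded by Pre_
  let m := coord
  let m := pvIter pvZStep z_axis.toNat m
  let m := pvIter pvXStep x_axis.toNat m
  pvIter pvYStep y_axis.toNat m

-- ===== PORT B =====
-- closed form of applying (a, b) -> (b, -a) exactly n times, by n mod 4
def pvQuarter (a b n : Int) : Int × Int :=
  let n := PySem.Int.mod n 4
  if n = 0 then (a, b)
  else if n = 1 then (b, -a)
  else if n = 2 then (-a, -b)
  else (-b, a)

def point_rotate_alt (coord : Int × Int × Int) (x_axis : Int) (y_axis : Int) (z_axis : Int) : Int × Int × Int :=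
  let (x, y, z) := coord
  let (x, y) := pvQuarter x y z_axis
  let (z, y) := pvQuarter z y x_axis
  let (x, z) := pvQuarter x z y_axis
  (x, y, z)

-- ===== PRECONDITION & SPEC =====
-- exactly the assert of A: outside it A (and B) raise AssertionError
def Pre_point_rotate (coord : Int × Int × Int) (x_axis : Int) (y_axis : Int) (z_axis : Int) : Prop :=
  0 ≤ x_axis ∧ x_axis < 4 ∧ 0 ≤ y_axis ∧ y_axis < 4 ∧ 0 ≤ z_axis ∧ z_axis < 4
instance (coord : Int × Int × Int) (x_axis : Int) (y_axis : Int) (z_axis : Int) : Decidable (Pre_point_rotate coord x_axis y_axis z_axis) := by unfold Pre_point_rotate; infer_instance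
def pvWitness_point_rotate : (Int × Int × Int) × Int × Int × Int := ((1, 2, 3), 1, 2, 3)

def Spec_point_rotate (coord : Int × Int × Int) (x_axis : Int) (y_axis : Int) (z_axis : Int) (out : Int × Int × Int) : Prop := out = point_rotate_alt coord x_axis y_axis z_axis
instance (coord : Int × Int × Int) (x_axis : Int) (y_axis : Int) (z_axis : Int) (out : Int × Int × Int) : Decidable (Spec_point_rotate coord x_axis y_axis z_axis out) := by unfold Spec_point_rotate; infer_instance

-- ===== CLAIM (what is proved, stated in full; the proofs are below) =====
def Claim_equal_point_rotate : Prop := ∀ (coord : Int × Int × Int) (x_axis : Int) (y_axis : Int) (z_axis : Int), Dom_point_rotate coord x_axis y_axis z_axis → Pre_point_rotate coord x_axis y_axis z_axis → Spec_point_rotate coord x_axis y_axis z_axis (point_rotate coord x_axis y_axis z_axis)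

-- ===== LEMMAS AND PROOFS =====

-- ===== VERDICT (by name: the statement is the Claim_ definition above) =====
theorem point_rotate_spec : Claim_equal_point_rotate := by
  intro ⟨x, y, z⟩ xa ya za _ ⟨hx0, hx4, hy0, hy4, hz0, hz4⟩
  unfold Spec_point_rotate
  interval_cases xa <;> interval_cases ya <;> interval_cases za <;>
    simp [point_rotate, point_rotate_alt, pvIter, pvZStep, pvXStep, pvYStep, pvQuarter, PySem.Int.mod]
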